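-- pv_equiv track=rewrite | github.com/c-hydro/shybox | shybox/runner_toolkit/execution/execution_handler.py | _env_key
-- ===== SOURCE A (Python) =====
-- def _env_key(s: str) -> str:
--     out = []
--     for ch in str(s):
--         out.append(ch.upper() if ch.isalnum() else "_")
--     key = "".join(out)
--     while "__" in key:
--         key = key.replace("__", "_")
--     return key.strip("_") or "KEY"
-- ===== SOURCE B (Python) =====
-- def _env_key(s: str) -> str:
--     out = []
--     for ch in str(s):
--         if ch.isalnum():
--             out.append(ch.upper())
--         elif out and out[-1] != "_":
--             out.append("_")
--     if out and out[-1] == "_":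
--         out.pop()
--     return "".join(out) or "KEY"
-- ===== Notes on version B (the rewrite author's own statement) =====
-- stated objective: alternative
-- what changed: Replaced the build-then-repeatedly-replace('__','_')-then-strip('_') pipeline by a single left-to-right pass that emits '_' only after a non-separator character and drops one trailing '_' at the end; it trades A's multi-pass string rewriting for one explicit scan of similar measured cost.
import Mathlib
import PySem

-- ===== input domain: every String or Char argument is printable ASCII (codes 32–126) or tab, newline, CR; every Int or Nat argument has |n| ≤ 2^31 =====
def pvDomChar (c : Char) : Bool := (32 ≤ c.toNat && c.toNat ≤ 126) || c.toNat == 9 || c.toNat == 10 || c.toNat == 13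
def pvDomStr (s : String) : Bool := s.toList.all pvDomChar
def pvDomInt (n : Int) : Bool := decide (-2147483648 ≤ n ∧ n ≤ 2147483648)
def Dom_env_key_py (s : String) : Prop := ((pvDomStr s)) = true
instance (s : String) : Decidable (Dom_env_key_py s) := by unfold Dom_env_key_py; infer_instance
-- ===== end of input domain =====

-- B is a single left-to-right pass that emits '_' only after a non-separator character,
-- instead of building the full mapped string and repeatedly replace('__','_')-ing it then stripping.

-- ===== PORT A =====
-- envRep is one pass of key.replace("__","_"); it is needed (only) to justify
-- termination of A's `while "__" in key` loop, so it lives above the port.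
def envRep : List Char → List Char
  | [] => []
  | [c] => [c]
  | c :: d :: t => if c = '_' ∧ d = '_' then '_' :: envRep t else c :: envRep (d :: t)

theorem go_eq (fuel : Nat) : ∀ (l acc : List Char), l.length ≤ fuel →
    PySem.Chars.replace.go ['_','_'] ['_'] fuel l acc = acc.reverse ++ envRep l := by
  induction fuel with
  | zero => intro l acc h; rw [PySem.Chars.replace.go.eq_def]
            simp at h; simp [h, envRep]
  | succ n ih =>
    intro l acc h
    rw [PySem.Chars.replace.go.eq_def]
    match l with
    | [] => simp [envRep]
    | [c] =>
      simp only [List.isPrefixOf, Bool.and_false, Bool.false_eq_true]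
      split
      · rename_i hp; by_cases hc : '_' = c <;> simp [hc] at hp
      · rw [ih [] (c :: acc) (by simp)]; simp [envRep]
    | c :: d :: t =>
      simp only [List.length_cons] at h
      simp only [List.isPrefixOf, Bool.and_true]
      split
      · rename_i hp
        obtain ⟨h1, h2⟩ : ('_' = c ∧ '_' = d) := by
          by_cases hc : '_' = c <;> by_cases hd : '_' = d <;>
            first | exact ⟨hc, hd⟩ | simp [hc, hd] at hp
        subst h1; subst h2
        rw [show (List.drop (['_','_'] : List Char).length ('_'::'_'::t)) = t from rfl]
        rw [ih t (['_'].reverse ++ acc) (by omega)]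
        simp [envRep]
      · rename_i hp
        have hcd : ¬ (c = '_' ∧ d = '_') := by
          rintro ⟨rfl, rfl⟩; simp at hp
        rw [ih (d :: t) (c :: acc) (by simp; omega)]
        simp [envRep, hcd]

theorem replace_us_eq (k : List Char) :
    PySem.Chars.replace k ['_','_'] ['_'] = envRep k := by
  rw [PySem.Chars.replace]
  simp only [List.isEmpty_cons, Bool.false_eq_true, if_false]
  simpa using go_eq k.length k [] le_rfl

theorem envRep_length_le (l : List Char) : (envRep l).length ≤ l.length := by
  fun_induction envRep <;> simp_all <;> omega

theorem envRep_length_lt (l : List Char) (h : ['_','_'] <:+: l) :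
    (envRep l).length < l.length := by
  fun_induction envRep with
  | case1 => simp at h
  | case2 c => obtain ⟨s, t, hst⟩ := h
               have := congrArg List.length hst; simp at this; omega
  | case3 c d t hcd ih =>
    have := envRep_length_le t; simp; omega
  | case4 c d t hcd ih =>
    have hin : ['_','_'] <:+: (d :: t) := by
      rcases List.infix_cons_iff.mp h with hpre | hinf
      · exfalso
        rcases hpre with ⟨r, hr⟩
        simp at hr
        exact hcd ⟨hr.1.symm ▸ rfl, hr.2.1.symm ▸ rfl⟩
      · exact hinf
    have := ih hin; simp at *; omega

-- the `while "__" in key: key = key.replace("__", "_")` loop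
def envLoop (key : List Char) : List Char :=
  if h : PySem.Chars.isIn ['_','_'] key = true then
    envLoop (PySem.Chars.replace key ['_','_'] ['_'])
  else key
termination_by key.length
decreasing_by
  rw [replace_us_eq]
  exact envRep_length_lt key ((PySem.Chars.isIn_iff_infix _ _).mp h)

def env_key_py (s : String) : String :=
  -- out = []; for ch in str(s): out.append(ch.upper() if ch.isalnum() else "_")
  -- key = "".join(out) — join with "" concatenates the appended one-char pieces, done inline (exact)
  let key := s.toList.foldl
    (fun out ch => out ++ (if PySem.Chars.isalnum ch then PySem.Chars.upper [ch] else ['_'])) []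
  let key := envLoop key
  -- return key.strip("_") or "KEY"
  let r := PySem.Chars.stripChars key ['_']
  if r.isEmpty then "KEY" else String.mk r

-- ===== PORT B =====
def env_key_py_alt (s : String) : String :=
  let out := s.toList.foldl
    (fun acc ch =>
      if PySem.Chars.isalnum ch then acc ++ PySem.Chars.upper [ch]
      else if acc ≠ [] ∧ acc.getLast? ≠ some '_' then acc ++ ['_']
      else acc) []
  -- if out and out[-1] == "_": out.pop()
  let out2 := if out ≠ [] ∧ out.getLast? = some '_' then out.dropLast else out
  -- return "".join(out) or "KEY"
  if out2.isEmpty then "KEY" else String.mk out2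

-- ===== PRECONDITION & SPEC =====
def Spec_env_key_py (s : String) (out : String) : Prop := out = env_key_py_alt s
instance (s : String) (out : String) : Decidable (Spec_env_key_py s out) := by unfold Spec_env_key_py; infer_instance

-- ===== CLAIM (what is proved, stated in full; the proofs are below) =====
def Claim_equal_env_key_py : Prop := ∀ (s : String), Dom_env_key_py s → Spec_env_key_py s (env_key_py s)

-- ===== LEMMAS AND PROOFS =====

-- the character map of A's first loop
def envF (ch : Char) : Char :=
  if PySem.Chars.isalnum ch then PySem.Chars.upperChar ch else '_'

-- squeeze runs of '_' to a single '_' (keeping the last of each run)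
def envSq : List Char → List Char
  | [] => []
  | c :: t => if c = '_' ∧ t.head? = some '_' then envSq t else c :: envSq t

-- B's emitted output, given whether a separator may currently be emitted
def envG : Bool → List Char → List Char
  | _, [] => []
  | b, ch :: t =>
    if PySem.Chars.isalnum ch then PySem.Chars.upperChar ch :: envG true t
    else if b then '_' :: envG false t else envG false t

-- drop one trailing '_' (B's final pop), and strip trailing '_'-run
def popT (a : List Char) : List Char :=
  if a ≠ [] ∧ a.getLast? = some '_' then a.dropLast else a
def pUS : Char → Bool := fun c => (['_'] : List Char).contains c
def rstU (a : List Char) : List Char := (List.dropWhile pUS a.reverse).reverse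

theorem upperChar_ne_us (c : Char) (h : PySem.Chars.isalnum c = true) :
    PySem.Chars.upperChar c ≠ '_' := by
  simp only [PySem.Chars.isalnum, PySem.Chars.isalpha, PySem.Chars.isdigit, PySem.Chars.isupper,
    PySem.Chars.islower, Bool.or_eq_true, Bool.and_eq_true, decide_eq_true_eq, Char.le_def,
    UInt32.le_iff_toNat_le] at h
  have hval : ∀ d : Char, d.val.toNat = d.toNat := fun d => rfl
  simp only [hval, show 'A'.toNat = 65 from rfl, show 'Z'.toNat = 90 from rfl,
    show 'a'.toNat = 97 from rfl, show 'z'.toNat = 122 from rfl,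
    show '0'.toNat = 48 from rfl, show '9'.toNat = 57 from rfl] at h
  unfold PySem.Chars.upperChar PySem.Chars.islower
  intro hc
  apply_fun Char.toNat at hc
  rw [show '_'.toNat = 95 from rfl] at hc
  split at hc <;>
    rename_i hl <;>
    [skip; omega] <;>
    (simp only [Bool.and_eq_true, decide_eq_true_eq, Char.le_def, UInt32.le_iff_toNat_le, hval,
      show 'a'.toNat = 97 from rfl, show 'z'.toNat = 122 from rfl] at hl)
  rw [Char.toNat_ofNat, if_pos (Or.inl (by omega))] at hc
  omega

theorem head?_envRep (l : List Char) : (envRep l).head? = l.head? := by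
  fun_induction envRep <;> simp_all

theorem sq_rep (l : List Char) : envSq (envRep l) = envSq l := by
  fun_induction envRep with
  | case1 => rfl
  | case2 c => rfl
  | case3 c d t hcd ih =>
    obtain ⟨rfl, rfl⟩ := hcd
    by_cases hh : t.head? = some '_'
    · simp [envSq, head?_envRep, hh, ih]
    · simp [envSq, head?_envRep, hh, ih]
  | case4 c d t hcd ih =>
    have hd : (envRep (d :: t)).head? = some d := by simp [head?_envRep]
    by_cases hc : c = '_' <;> by_cases hdd : d = '_' <;>
      simp_all [envSq, head?_envRep]

theorem sq_no_double (l : List Char) (h : ¬ (['_','_'] <:+: l)) : envSq l = l := by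
  induction l with
  | nil => rfl
  | cons c t ih =>
    have hcond : ¬ (c = '_' ∧ t.head? = some '_') := by
      rintro ⟨rfl, hh⟩
      cases t with
      | nil => simp at hh
      | cons b t' =>
        rw [List.head?_cons, Option.some.injEq] at hh
        subst hh
        exact h ⟨[], t', by simp⟩
    have ht : ¬ (['_','_'] <:+: t) := fun hin => h (List.infix_cons_iff.mpr (Or.inr hin))
    simp [envSq, hcond, ih ht]

theorem envLoop_eq_sq_aux : ∀ (n : Nat) (l : List Char), l.length ≤ n → envLoop l = envSq l := by
  intro n
  induction n with
  | zero =>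
    intro l h
    simp only [Nat.le_zero, List.length_eq_zero_iff] at h
    subst h
    rw [envLoop, dif_neg (by decide)]
    rfl
  | succ n ih =>
    intro l h
    rw [envLoop]
    split
    · rename_i hin
      rw [replace_us_eq]
      have hlt := envRep_length_lt l ((PySem.Chars.isIn_iff_infix _ _).mp hin)
      rw [ih (envRep l) (by omega)]
      exact sq_rep l
    · rename_i hin
      exact (sq_no_double l ((PySem.Chars.isIn_eq_false_iff _ _).mp (by simpa using hin))).symm

theorem envLoop_eq_sq (l : List Char) : envLoop l = envSq l :=
  envLoop_eq_sq_aux l.length l le_rfl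

theorem pUS_eq (c : Char) : pUS c = decide (c = '_') := by
  show (['_'] : List Char).contains c = decide (c = '_')
  simp

theorem popT_cons_of_ne (c : Char) (a : List Char) (hc : c ≠ '_') :
    popT (c :: a) = c :: popT a := by
  match a with
  | [] => simp [popT, hc]
  | b :: r => simp only [popT, List.getLast?_cons_cons]
              by_cases hh : (b :: r).getLast? = some '_' <;> simp [hh]

theorem popT_cons_ne_nil (c : Char) (a : List Char) (ha : a ≠ []) :
    popT (c :: a) = c :: popT a := by
  match a with
  | b :: r => simp only [popT, List.getLast?_cons_cons]
              by_cases hh : (b :: r).getLast? = some '_' <;> simp [hh]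

theorem rstU_cons_not (c : Char) (a : List Char) (h : pUS c = false) :
    rstU (c :: a) = c :: rstU a := by
  simp only [rstU, List.reverse_cons, List.dropWhile_append]
  split
  · rename_i he
    simp only [List.isEmpty_iff] at he
    simp [List.dropWhile, h, he]
  · simp

theorem rstU_us_cons (a : List Char) (h : rstU a ≠ []) :
    rstU ('_' :: a) = '_' :: rstU a := by
  simp only [rstU, List.reverse_cons, List.dropWhile_append]
  split
  · rename_i he
    exfalso
    apply h
    simp only [List.isEmpty_iff] at he
    simp [rstU, he]
  · simp

theorem ST_eq (a : List Char) :
    PySem.Chars.stripChars a ['_'] = rstU (a.dropWhile pUS) := rfl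

theorem ST_cons_not (c : Char) (a : List Char) (h : pUS c = false) :
    PySem.Chars.stripChars (c :: a) ['_'] = c :: rstU a := by
  rw [ST_eq, List.dropWhile_cons_of_neg (by simp [h]), rstU_cons_not c _ h]

theorem ST_us (a : List Char) :
    PySem.Chars.stripChars ('_' :: a) ['_'] = PySem.Chars.stripChars a ['_'] := by
  rw [ST_eq, ST_eq, List.dropWhile_cons_of_pos (by simp [pUS_eq])]

theorem ST_sq_us (x : List Char) :
    PySem.Chars.stripChars (envSq ('_' :: x)) ['_'] = PySem.Chars.stripChars (envSq x) ['_'] := by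
  by_cases hh : x.head? = some '_'
  · simp [envSq, hh]
  · simp only [envSq, hh, and_false, if_false]
    exact ST_us (envSq x)


theorem foldB : ∀ (l acc : List Char) (b : Bool),
    (b = true ↔ (acc ≠ [] ∧ acc.getLast? ≠ some '_')) →
    l.foldl (fun acc ch =>
      if PySem.Chars.isalnum ch then acc ++ PySem.Chars.upper [ch]
      else if acc ≠ [] ∧ acc.getLast? ≠ some '_' then acc ++ ['_']
      else acc) acc = acc ++ envG b l := by
  intro l
  induction l with
  | nil => intro acc b hb; simp [envG]
  | cons ch t ih =>
    intro acc b hb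
    rw [List.foldl_cons]
    by_cases ha : PySem.Chars.isalnum ch = true
    · rw [if_pos ha]
      have hu : PySem.Chars.upper [ch] = [PySem.Chars.upperChar ch] := rfl
      rw [hu, ih (acc ++ [PySem.Chars.upperChar ch]) true
        (by simp [List.getLast?_concat]; exact upperChar_ne_us ch ha)]
      simp [envG, ha]
    · rw [if_neg (by simp [ha])]
      by_cases hbb : b = true
      · rw [if_pos (hb.mp hbb), ih (acc ++ ['_']) false (by simp [List.getLast?_concat])]
        simp [envG, ha, hbb]
      · rw [if_neg (fun hc => hbb (hb.mpr hc)),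
          ih acc false (iff_of_false (by simp) (fun hc => hbb (hb.mpr hc)))]
        simp [envG, ha, hbb]

theorem main3 : ∀ (n : Nat) (l : List Char), l.length ≤ n →
    (PySem.Chars.stripChars (envSq (l.map envF)) ['_'] = popT (envG false l)) ∧
    (rstU (envSq (l.map envF)) = popT (envG true l)) ∧
    (rstU (envSq ('_' :: l.map envF)) = popT ('_' :: envG false l)) := by
  intro n
  induction n with
  | zero =>
    intro l h
    simp only [Nat.le_zero, List.length_eq_zero_iff] at h
    subst h
    refine ⟨by decide, by decide, by decide⟩
  | succ n ih =>
    intro l h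
    match l with
    | [] => refine ⟨by decide, by decide, by decide⟩
    | ch :: t =>
      simp only [List.length_cons] at h
      obtain ⟨ihA, ihB, ihC⟩ := ih t (by omega)
      by_cases ha : PySem.Chars.isalnum ch = true
      · have hune : PySem.Chars.upperChar ch ≠ '_' := upperChar_ne_us ch ha
        have hpu : pUS (PySem.Chars.upperChar ch) = false := by rw [pUS_eq]; simp [hune]
        have hmap : (ch :: t).map envF = PySem.Chars.upperChar ch :: t.map envF := by
          simp [envF, ha]
        have hsq : envSq (PySem.Chars.upperChar ch :: t.map envF)
            = PySem.Chars.upperChar ch :: envSq (t.map envF) := by simp [envSq, hune]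
        have hG : ∀ b, envG b (ch :: t) = PySem.Chars.upperChar ch :: envG true t := by
          intro b; simp [envG, ha]
        refine ⟨?_, ?_, ?_⟩
        · rw [hmap, hsq, ST_cons_not _ _ hpu, hG, popT_cons_of_ne _ _ hune, ihB]
        · rw [hmap, hsq, rstU_cons_not _ _ hpu, hG, popT_cons_of_ne _ _ hune, ihB]
        · rw [hmap]
          have h1 : envSq ('_' :: PySem.Chars.upperChar ch :: t.map envF)
              = '_' :: PySem.Chars.upperChar ch :: envSq (t.map envF) := by
            simp [envSq, hune]
          have h2 : rstU (PySem.Chars.upperChar ch :: envSq (t.map envF))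
              = PySem.Chars.upperChar ch :: rstU (envSq (t.map envF)) := rstU_cons_not _ _ hpu
          rw [h1, rstU_us_cons _ (by rw [h2]; simp), h2, hG,
            popT_cons_ne_nil '_' _ (by simp), popT_cons_of_ne _ _ hune, ihB]
      · have hmap : (ch :: t).map envF = '_' :: t.map envF := by simp [envF, ha]
        have hG : envG false (ch :: t) = envG false t := by simp [envG, ha]
        have hGt : envG true (ch :: t) = '_' :: envG false t := by simp [envG, ha]
        refine ⟨?_, ?_, ?_⟩
        · rw [hmap, ST_sq_us, hG]; exact ihA
        · rw [hmap, hGt]; exact ihC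
        · have h1 : envSq ('_' :: '_' :: t.map envF) = envSq ('_' :: t.map envF) := by
            simp [envSq]
          rw [hmap, h1, hG]; exact ihC

-- ===== VERDICT (by name: the statement is the Claim_ definition above) =====
theorem env_key_py_spec : Claim_equal_env_key_py := by
  intro s _
  show env_key_py s = env_key_py_alt s
  unfold env_key_py env_key_py_alt
  have hfold : s.toList.foldl
      (fun out ch => out ++ (if PySem.Chars.isalnum ch then PySem.Chars.upper [ch] else ['_'])) []
      = s.toList.map envF := by
    have hfun : (fun (out : List Char) ch =>
        out ++ (if PySem.Chars.isalnum ch then PySem.Chars.upper [ch] else ['_']))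
        = (fun (out : List Char) ch => out ++ [envF ch]) := by
      funext out ch
      by_cases h : PySem.Chars.isalnum ch = true <;> simp [h, envF, PySem.Chars.upper]
    rw [hfun, PySem.List.foldl_append_singleton_eq_map]
    simp
  simp only [hfold, envLoop_eq_sq, foldB s.toList [] false (by simp),
    (main3 s.toList.length s.toList le_rfl).1, List.nil_append]
  rfl
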